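-- pv_equiv track=rewrite | github.com/Nearsoft/google-code-jam | solutions/double-or-one-thing/python/double-or-one-thing.py | solution
-- ===== SOURCE A (Python) =====
-- def solution(inp):
--     repeat = 1
--     answer = ""
--
--     for l in range(len(inp)-1):
--         if inp[l] == inp[l+1]:
--             repeat+=1
--         else:
--             if inp[l] < inp[l+1]: # A < B , H > C, E < T, ...
--                 answer+=inp[l]*2*repeat
--             else:
--                 answer+=inp[l]*repeat
--             repeat = 1
--
--     answer += inp[len(inp)-1]*repeat
--     return answer
-- ===== SOURCE B (Python) =====
-- def solution(inp):
--     runs = []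
--     for ch in inp:
--         if runs and runs[-1][0] == ch:
--             runs[-1][1] += 1
--         else:
--             runs.append([ch, 1])
--     parts = []
--     for (ch, n), nxt in zip(runs, runs[1:] + [None]):
--         if nxt is not None and ch < nxt[0]:
--             parts.append(ch * (2 * n))
--         else:
--             parts.append(ch * n)
--     return "".join(parts)
-- ===== Notes on version B (the rewrite author's own statement) =====
-- stated objective: idiomatic
-- what changed: B first builds an explicit run-length table of the string and then emits each run once with next-run lookahead, instead of A's single index loop comparing adjacent characters with a reset counter.
-- outside the precondition, e.g. on solution(''): A raises IndexError, B returns ''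
import Mathlib
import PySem

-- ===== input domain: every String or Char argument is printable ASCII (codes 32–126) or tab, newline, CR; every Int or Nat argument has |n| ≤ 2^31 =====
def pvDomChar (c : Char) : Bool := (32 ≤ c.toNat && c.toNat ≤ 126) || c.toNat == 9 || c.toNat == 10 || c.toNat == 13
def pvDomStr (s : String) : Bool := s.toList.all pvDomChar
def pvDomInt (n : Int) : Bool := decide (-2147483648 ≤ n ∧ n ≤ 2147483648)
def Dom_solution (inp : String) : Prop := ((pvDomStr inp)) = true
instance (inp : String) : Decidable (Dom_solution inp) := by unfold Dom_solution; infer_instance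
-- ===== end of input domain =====

-- B replaces A's index loop with a reset counter by an explicit run-length table with
-- next-run lookahead (objective: idiomatic/alternative decomposition, same cost).

-- ===== PORT A =====
-- one step of A's for-loop over l in range(len(inp)-1); state = (repeat, answer)
def solStepA (cs : List Char) (st : Nat × List Char) (l : Nat) : Nat × List Char :=
  let a := cs.getD l ' '
  let b := cs.getD (l+1) ' '
  if a = b then (st.1 + 1, st.2)
  else if a < b then (1, st.2 ++ List.replicate (2 * st.1) a)
  else (1, st.2 ++ List.replicate st.1 a)

def solution (inp : String) : String :=
  let cs := inp.toList
  let st := (List.range (cs.length - 1)).foldl (solStepA cs) (1, [])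
  String.ofList (st.2 ++ List.replicate st.1 (cs.getD (cs.length - 1) ' '))

-- ===== PORT B =====
-- first loop of B: build the run table (runs[-1] update ↦ dropLast ++ [..])
def solBuildB (runs : List (Char × Nat)) (ch : Char) : List (Char × Nat) :=
  match runs.getLast? with
  | some (c, n) => if c = ch then runs.dropLast ++ [(c, n + 1)] else runs ++ [(ch, 1)]
  | none => [(ch, 1)]

-- second loop of B: zip(runs, runs[1:] + [None]) and emit each piece
def solEmitB (p : (Char × Nat) × Option (Char × Nat)) : List Char :=
  match p with
  | ((ch, n), nxt) =>
    match nxt with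
    | some (d, _) => if ch < d then List.replicate (2 * n) ch else List.replicate n ch
    | none => List.replicate n ch

def solution_alt (inp : String) : String :=
  let runs := inp.toList.foldl solBuildB []
  let parts := (runs.zip (runs.tail.map some ++ [none])).map solEmitB
  String.ofList parts.flatten

-- ===== PRECONDITION & SPEC =====
-- Pre_ excludes only the empty string, on which A raises IndexError (inp[-1] on ""); B returns "" there.
def Pre_solution (inp : String) : Prop := inp ≠ ""
instance (inp : String) : Decidable (Pre_solution inp) := by unfold Pre_solution; infer_instance
def pvWitness_solution : String := "aab"

def Spec_solution (inp : String) (out : String) : Prop := out = solution_alt inp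
instance (inp : String) (out : String) : Decidable (Spec_solution inp out) := by unfold Spec_solution; infer_instance

-- ===== CLAIM (what is proved, stated in full; the proofs are below) =====
def Claim_equal_solution : Prop := ∀ (inp : String), Dom_solution inp → Pre_solution inp → Spec_solution inp (solution inp)

-- ===== LEMMAS AND PROOFS =====

-- common characterisation: process the rest of the string with a pending run count r
def recA : List Char → Nat → List Char
  | [], _ => []
  | [a], r => List.replicate r a
  | a :: b :: t, r =>
    if a = b then recA (b :: t) (r + 1)
    else (if a < b then List.replicate (2 * r) a else List.replicate r a) ++ recA (b :: t) (1 : Nat)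

-- run-length encoding of t with a pending run (c, n)
def runsFrom (c : Char) (n : Nat) : List Char → List (Char × Nat)
  | [] => [(c, n)]
  | d :: t => if c = d then runsFrom c (n + 1) t else (c, n) :: runsFrom d 1 t

-- ---- A side ----

lemma solStepA_cons (c : Char) (cs : List Char) (st : Nat × List Char) (l : Nat) :
    solStepA (c :: cs) st (l + 1) = solStepA cs st l := by
  simp [solStepA]

lemma foldl_stepA_shift (c : Char) (cs : List Char) (st : Nat × List Char) (n : Nat) :
    (List.map (· + 1) (List.range n)).foldl (solStepA (c :: cs)) st
      = (List.range n).foldl (solStepA cs) st := by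
  rw [List.foldl_map]
  have hfun : (fun st l => solStepA (c :: cs) st (l + 1)) = solStepA cs :=
    funext fun st => funext fun l => solStepA_cons c cs st l
  rw [hfun]

lemma A_loop : ∀ (cs : List Char) (c : Char) (r : Nat) (acc : List Char),
    (let st := (List.range ((c :: cs).length - 1)).foldl (solStepA (c :: cs)) (r, acc)
     st.2 ++ List.replicate st.1 ((c :: cs).getD ((c :: cs).length - 1) ' '))
      = acc ++ recA (c :: cs) r := by
  intro cs
  induction cs with
  | nil => intro c r acc; simp [recA]
  | cons d t ih =>
    intro c r acc
    have hrange : List.range ((c :: d :: t).length - 1)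
        = 0 :: List.map (· + 1) (List.range ((d :: t).length - 1)) := by
      simp [List.range_succ_eq_map]
    simp only [hrange, List.foldl_cons, foldl_stepA_shift]
    have hlast : (c :: d :: t).getD ((c :: d :: t).length - 1) ' '
        = (d :: t).getD ((d :: t).length - 1) ' ' := by
      simp [List.getD]
      rfl
    by_cases hcd : c = d
    · have hstep : solStepA (c :: d :: t) (r, acc) 0 = (r + 1, acc) := by
        simp [solStepA, hcd]
      rw [hstep, hlast, ih d (r + 1) acc]
      subst hcd
      simp [recA]
    · by_cases hlt : c < d
      · have hstep : solStepA (c :: d :: t) (r, acc) 0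
            = (1, acc ++ List.replicate (2 * r) c) := by
          simp [solStepA, hcd, hlt]
        rw [hstep, hlast, ih d 1 (acc ++ List.replicate (2 * r) c)]
        simp [recA, hcd, hlt]
      · have hstep : solStepA (c :: d :: t) (r, acc) 0
            = (1, acc ++ List.replicate r c) := by
          simp [solStepA, hcd, hlt]
        rw [hstep, hlast, ih d 1 (acc ++ List.replicate r c)]
        simp [recA, hcd, hlt]

lemma solution_eq_recA (c : Char) (cs : List Char) :
    solution (String.ofList (c :: cs)) = String.ofList (recA (c :: cs) 1) := by
  have h := A_loop cs c 1 []
  simp only [solution, String.toList_ofList]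
  exact congrArg String.ofList h

-- ---- B side ----

lemma build_invariant : ∀ (cs : List Char) (pre : List (Char × Nat)) (c : Char) (n : Nat),
    cs.foldl solBuildB (pre ++ [(c, n)]) = pre ++ runsFrom c n cs := by
  intro cs
  induction cs with
  | nil => intro pre c n; simp [runsFrom]
  | cons d t ih =>
    intro pre c n
    have hlast : (pre ++ [(c, n)]).getLast? = some (c, n) := by
      simp [List.getLast?_append]
    by_cases h : c = d
    · have hb : solBuildB (pre ++ [(c, n)]) d = pre ++ [(c, n + 1)] := by
        simp [solBuildB, hlast, h, List.dropLast_append_of_ne_nil]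
      simp only [List.foldl_cons, hb, ih, runsFrom, if_pos h]
    · have hb : solBuildB (pre ++ [(c, n)]) d = (pre ++ [(c, n)]) ++ [(d, 1)] := by
        simp [solBuildB, hlast, h]
      simp only [List.foldl_cons, hb]
      rw [ih ((pre ++ [(c, n)])) d 1]
      simp [runsFrom, h]

lemma runsFrom_head (cs : List Char) : ∀ (c : Char) (n : Nat),
    ∃ m rest, runsFrom c n cs = (c, m) :: rest := by
  induction cs with
  | nil => exact fun c n => ⟨n, [], rfl⟩
  | cons d t ih =>
    intro c n
    by_cases h : c = d
    · subst h
      obtain ⟨m, rest, hm⟩ := ih c (n + 1)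
      exact ⟨m, rest, by simp [runsFrom, hm]⟩
    · exact ⟨n, runsFrom d 1 t, by simp [runsFrom, h]⟩

-- the emit loop computed on a run list
def outRuns : List (Char × Nat) → List Char
  | [] => []
  | [(c, n)] => List.replicate n c
  | (c, n) :: (d, m) :: t =>
    (if c < d then List.replicate (2 * n) c else List.replicate n c) ++ outRuns ((d, m) :: t)

lemma emit_eq_outRuns : ∀ (runs : List (Char × Nat)),
    ((runs.zip (runs.tail.map some ++ [none])).map solEmitB).flatten = outRuns runs := by
  intro runs
  induction runs with
  | nil => simp [outRuns]
  | cons p rest ih =>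
    obtain ⟨c, n⟩ := p
    cases rest with
    | nil => simp [outRuns, solEmitB]
    | cons q t =>
      obtain ⟨d, m⟩ := q
      simp only [List.tail_cons, List.map_cons, List.cons_append] at *
      rw [List.zip_cons_cons, List.map_cons, List.flatten_cons, ih]
      simp [outRuns, solEmitB]

lemma outRuns_runsFrom : ∀ (cs : List Char) (c : Char) (n : Nat),
    outRuns (runsFrom c n cs) = recA (c :: cs) n := by
  intro cs
  induction cs with
  | nil => intro c n; simp [runsFrom, outRuns, recA]
  | cons d t ih =>
    intro c n
    by_cases h : c = d
    · subst h
      simp [runsFrom, recA, ih]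
    · obtain ⟨m, rest, hm⟩ := runsFrom_head t d 1
      have : outRuns ((c, n) :: runsFrom d 1 t)
          = (if c < d then List.replicate (2 * n) c else List.replicate n c)
            ++ outRuns (runsFrom d 1 t) := by
        rw [hm]; rfl
      simp only [runsFrom, this, ih d 1, recA, if_neg h]

lemma solution_alt_eq_recA (c : Char) (cs : List Char) :
    solution_alt (String.ofList (c :: cs)) = String.ofList (recA (c :: cs) 1) := by
  have hbuild : (c :: cs).foldl solBuildB [] = runsFrom c 1 cs := by
    have h := build_invariant cs [] c 1
    simpa [solBuildB] using h
  simp only [solution_alt, String.toList_ofList, hbuild]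
  rw [emit_eq_outRuns, outRuns_runsFrom]

-- ===== VERDICT (by name: the statement is the Claim_ definition above) =====
theorem solution_spec : Claim_equal_solution := by
  intro inp _ hpre
  unfold Spec_solution
  cases hcs : inp.toList with
  | nil =>
    have : inp = "" := by
      rw [← String.ofList_toList (s := inp), hcs]
    exact absurd this hpre
  | cons c cs =>
    have hinp : inp = String.ofList (c :: cs) := by
      rw [← String.ofList_toList (s := inp), hcs]
    rw [hinp, solution_eq_recA, solution_alt_eq_recA]
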